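-- pv_equiv track=rewrite | github.com/enpasos/jax2onnx | tests/_initializer_guard.py | _canonical_model_name
-- ===== SOURCE A (Python) =====
-- def _canonical_model_name(name: str) -> str:
--     base = name or ""
--
--     suffixes = ("_dynamic", "_f64", "_f32")
--     changed = True
--     while base and changed:
--         changed = False
--         for suffix in suffixes:
--             if base.endswith(suffix):
--                 base = base[: -len(suffix)]
--                 changed = True
--     return base
-- ===== SOURCE B (Python) =====
-- def _canonical_model_name(name: str) -> str:
--     base = name or ""
--     for suffix in ("_dynamic", "_f64", "_f32"):
--         if base.endswith(suffix):
--             return _canonical_model_name(base[: -len(suffix)])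
--     return base
-- ===== Notes on version B (the rewrite author's own statement) =====
-- stated objective: simpler
-- what changed: Replaces A's while/for fixpoint with a mutable boolean flag (each outer pass re-scans the whole suffix tuple) by a direct structural recursion: strip the first matching suffix and recurse, return when none matches.
import Mathlib
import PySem

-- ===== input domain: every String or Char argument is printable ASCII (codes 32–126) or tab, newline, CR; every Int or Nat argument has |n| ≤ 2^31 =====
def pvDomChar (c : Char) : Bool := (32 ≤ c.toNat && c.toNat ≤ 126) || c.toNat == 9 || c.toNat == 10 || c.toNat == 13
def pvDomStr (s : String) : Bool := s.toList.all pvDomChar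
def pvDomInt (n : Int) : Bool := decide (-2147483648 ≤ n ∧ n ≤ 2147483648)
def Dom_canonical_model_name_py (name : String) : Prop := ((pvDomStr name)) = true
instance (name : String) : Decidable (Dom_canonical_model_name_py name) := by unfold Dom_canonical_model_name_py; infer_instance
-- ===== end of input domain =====

-- B replaces A's while/for fixpoint with a boolean flag by a direct recursion that
-- strips the first matching suffix and recurses (objective: simpler).

-- ===== PORT A =====
-- one pass of the 'for suffix in suffixes' body over the state (base, changed), changed starting False
def pvAStep (base : List Char) : List Char × Bool :=
  let r1 := if PySem.Chars.endswith base "_dynamic".toList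
            then (PySem.List.slice base none (some (-8)), true) else (base, false)
  let r2 := if PySem.Chars.endswith r1.1 "_f64".toList
            then (PySem.List.slice r1.1 none (some (-4)), true) else r1
  if PySem.Chars.endswith r2.1 "_f32".toList
            then (PySem.List.slice r2.1 none (some (-4)), true) else r2

-- termination fact for the while loop: a pass that set 'changed' shortened 'base'
set_option maxHeartbeats 1600000 in
theorem pvAStep_lt (base : List Char) (h : (pvAStep base).2 = true) :
    (pvAStep base).1.length < base.length := by
  have e8 : ∀ s : List Char, PySem.Chars.endswith s "_dynamic".toList = true → 8 ≤ s.length := by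
    intro s hp
    have := ((PySem.Chars.endswith_iff s _).mp hp).length_le
    simpa using this
  have e64 : ∀ s : List Char, PySem.Chars.endswith s "_f64".toList = true → 4 ≤ s.length := by
    intro s hp
    have := ((PySem.Chars.endswith_iff s _).mp hp).length_le
    simpa using this
  have e32 : ∀ s : List Char, PySem.Chars.endswith s "_f32".toList = true → 4 ≤ s.length := by
    intro s hp
    have := ((PySem.Chars.endswith_iff s _).mp hp).length_le
    simpa using this
  unfold pvAStep at h ⊢
  simp only [PySem.List.slice_to_neg_ofNat _ 8 (by omega),
             PySem.List.slice_to_neg_ofNat _ 4 (by omega)] at h ⊢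
  split_ifs at h ⊢ with h1 h2 h3 h4 h5 h6 h7 <;> dsimp only at h ⊢
  all_goals try simp at h
  all_goals
    (first | (have a1 := e8 _ h1) | (have a1 := e64 _ h1) | (have a1 := e32 _ h1) | skip) <;>
    (first | (have a2 := e8 _ h2) | (have a2 := e64 _ h2) | (have a2 := e32 _ h2) | skip) <;>
    (first | (have a3 := e8 _ h3) | (have a3 := e64 _ h3) | (have a3 := e32 _ h3) | skip) <;>
    (first | (have a4 := e8 _ h4) | (have a4 := e64 _ h4) | (have a4 := e32 _ h4) | skip) <;>
    (first | (have a5 := e8 _ h5) | (have a5 := e64 _ h5) | (have a5 := e32 _ h5) | skip) <;>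
    (first | (have a6 := e8 _ h6) | (have a6 := e64 _ h6) | (have a6 := e32 _ h6) | skip) <;>
    (first | (have a7 := e8 _ h7) | (have a7 := e64 _ h7) | (have a7 := e32 _ h7) | skip) <;>
    (try simp only [List.length_take] at *) <;> omega

-- while base and changed: … (changed initially True)
def pvALoop (base : List Char) : List Char :=
  if base.isEmpty then base
  else
    let p := pvAStep base
    if h : p.2 = true then pvALoop p.1 else p.1
termination_by base.length
decreasing_by exact pvAStep_lt base h

def canonical_model_name_py (name : String) : String :=
  -- base = name or ""  (for a str argument this is name itself: "" or "" == "")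
  String.ofList (pvALoop name.toList)

-- ===== PORT B =====
-- termination fact for B's recursion: a matched nonempty suffix makes base[:-k] strictly shorter
theorem pvBStrip_lt (base t : List Char) (k : Nat) (hk : 1 < k) (hlen : t.length = k)
    (h : PySem.Chars.endswith base t = true) :
    (PySem.List.slice base none (some (-(k : Int)))).length < base.length := by
  have hle : t.length ≤ base.length := ((PySem.Chars.endswith_iff base t).mp h).length_le
  rw [PySem.List.slice_to_neg_natCast base k (by omega)]
  simp [List.length_take]
  omega

-- 'for suffix in suffixes: if base.endswith(suffix): return _canonical_model_name(base[:-len(suffix)])'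
def pvBRec (base : List Char) : List Char :=
  if h1 : PySem.Chars.endswith base "_dynamic".toList = true then
    pvBRec (PySem.List.slice base none (some (-8)))
  else if h2 : PySem.Chars.endswith base "_f64".toList = true then
    pvBRec (PySem.List.slice base none (some (-4)))
  else if h3 : PySem.Chars.endswith base "_f32".toList = true then
    pvBRec (PySem.List.slice base none (some (-4)))
  else base
termination_by base.length
decreasing_by
  · exact pvBStrip_lt base _ 8 (by omega) (by decide) h1
  · exact pvBStrip_lt base _ 4 (by omega) (by decide) h2
  · exact pvBStrip_lt base _ 4 (by omega) (by decide) h3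

def canonical_model_name_py_alt (name : String) : String :=
  -- base = name or ""
  String.ofList (pvBRec name.toList)

-- ===== PRECONDITION & SPEC =====
def Spec_canonical_model_name_py (name : String) (out : String) : Prop := out = canonical_model_name_py_alt name
instance (name : String) (out : String) : Decidable (Spec_canonical_model_name_py name out) := by unfold Spec_canonical_model_name_py; infer_instance

-- ===== CLAIM (what is proved, stated in full; the proofs are below) =====
def Claim_equal_canonical_model_name_py : Prop := ∀ (name : String), Dom_canonical_model_name_py name → Spec_canonical_model_name_py name (canonical_model_name_py name)

-- ===== LEMMAS AND PROOFS =====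

-- greedy one-suffix-at-a-time peeling in take-form, the common reference shape of both ports
def pvPeel (l : List Char) : List Char :=
  if h1 : "_dynamic".toList <:+ l then pvPeel (l.take (l.length - 8))
  else if h2 : "_f64".toList <:+ l then pvPeel (l.take (l.length - 4))
  else if h3 : "_f32".toList <:+ l then pvPeel (l.take (l.length - 4))
  else l
termination_by l.length
decreasing_by
  · have := h1.length_le; simp at this; simp [List.length_take]; omega
  · have := h2.length_le; simp at this; simp [List.length_take]; omega
  · have := h3.length_le; simp at this; simp [List.length_take]; omega

theorem pvLast_suffix {s l : List Char} (hs : s ≠ []) (h : s <:+ l) :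
    l.getLast? = s.getLast? := by
  obtain ⟨t, rfl⟩ := h
  exact List.getLast?_append_of_ne_nil t hs

-- the three suffixes end in distinct characters, so at most one matches
theorem pvNotDyn_of_f64 {l : List Char} (h : "_f64".toList <:+ l) :
    ¬ "_dynamic".toList <:+ l := by
  intro h2
  have a := pvLast_suffix (by decide) h
  have b := pvLast_suffix (by decide) h2
  exact absurd (a.symm.trans b) (by decide)

theorem pvNotDyn_of_f32 {l : List Char} (h : "_f32".toList <:+ l) :
    ¬ "_dynamic".toList <:+ l := by
  intro h2
  have a := pvLast_suffix (by decide) h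
  have b := pvLast_suffix (by decide) h2
  exact absurd (a.symm.trans b) (by decide)

theorem pvNotF64_of_f32 {l : List Char} (h : "_f32".toList <:+ l) :
    ¬ "_f64".toList <:+ l := by
  intro h2
  have a := pvLast_suffix (by decide) h
  have b := pvLast_suffix (by decide) h2
  exact absurd (a.symm.trans b) (by decide)

theorem pvPeel_dyn {l : List Char} (h : "_dynamic".toList <:+ l) :
    pvPeel l = pvPeel (l.take (l.length - 8)) := by
  rw [pvPeel, dif_pos h]

theorem pvPeel_f64 {l : List Char} (h : "_f64".toList <:+ l) :
    pvPeel l = pvPeel (l.take (l.length - 4)) := by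
  rw [pvPeel, dif_neg (pvNotDyn_of_f64 h), dif_pos h]

theorem pvPeel_f32 {l : List Char} (h : "_f32".toList <:+ l) :
    pvPeel l = pvPeel (l.take (l.length - 4)) := by
  rw [pvPeel, dif_neg (pvNotDyn_of_f32 h), dif_neg (pvNotF64_of_f32 h), dif_pos h]

theorem pvPeel_none {l : List Char} (h1 : ¬ "_dynamic".toList <:+ l)
    (h2 : ¬ "_f64".toList <:+ l) (h3 : ¬ "_f32".toList <:+ l) : pvPeel l = l := by
  rw [pvPeel, dif_neg h1, dif_neg h2, dif_neg h3]

-- each conditional strip inside A's pass is absorbed by pvPeel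
theorem pvStepD (m : List Char) :
    pvPeel (if PySem.Chars.endswith m "_dynamic".toList then List.take (m.length - 8) m else m)
      = pvPeel m := by
  split_ifs with h
  · exact (pvPeel_dyn ((PySem.Chars.endswith_iff _ _).mp h)).symm
  · rfl

theorem pvStep64 (m : List Char) :
    pvPeel (if PySem.Chars.endswith m "_f64".toList then List.take (m.length - 4) m else m)
      = pvPeel m := by
  split_ifs with h
  · exact (pvPeel_f64 ((PySem.Chars.endswith_iff _ _).mp h)).symm
  · rfl

theorem pvStep32 (m : List Char) :
    pvPeel (if PySem.Chars.endswith m "_f32".toList then List.take (m.length - 4) m else m)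
      = pvPeel m := by
  split_ifs with h
  · exact (pvPeel_f32 ((PySem.Chars.endswith_iff _ _).mp h)).symm
  · rfl

theorem pvAStep_peel (l : List Char) : pvPeel (pvAStep l).1 = pvPeel l := by
  unfold pvAStep
  simp only [PySem.List.slice_to_neg_ofNat _ 8 (by omega),
             PySem.List.slice_to_neg_ofNat _ 4 (by omega), apply_ite (Prod.fst)]
  rw [pvStep32, pvStep64, pvStepD]

theorem pvAStep_false (l : List Char) (h : (pvAStep l).2 = false) :
    (pvAStep l).1 = l ∧ pvPeel l = l := by
  unfold pvAStep at h ⊢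
  simp only [apply_ite (Prod.fst), apply_ite (Prod.snd)] at h ⊢
  split_ifs at h ⊢ with h1 h2 h3 h4 h5 h6 h7 h8 h9 <;> try simp at h
  refine ⟨rfl, pvPeel_none ?_ ?_ ?_⟩
  · exact fun hs => h1 ((PySem.Chars.endswith_iff _ _).mpr hs)
  · exact fun hs => h5 ((PySem.Chars.endswith_iff _ _).mpr hs)
  · exact fun hs => h7 ((PySem.Chars.endswith_iff _ _).mpr hs)

theorem pvALoop_eq_peel (base : List Char) : pvALoop base = pvPeel base := by
  rw [pvALoop]
  by_cases he : base.isEmpty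
  · rw [if_pos he]
    have hb : base = [] := List.isEmpty_iff.mp he
    subst hb
    rw [pvPeel, dif_neg (by decide), dif_neg (by decide), dif_neg (by decide)]
  · rw [if_neg he]
    by_cases hc : (pvAStep base).2 = true
    · rw [dif_pos hc, pvALoop_eq_peel (pvAStep base).1, pvAStep_peel]
    · rw [dif_neg hc]
      have hf := pvAStep_false base (by simpa using hc)
      rw [hf.1, hf.2]
termination_by base.length
decreasing_by exact pvAStep_lt base hc

-- B's recursion is pvPeel with the slices written in take-form
theorem pvBRec_eq_peel (base : List Char) : pvBRec base = pvPeel base := by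
  rw [pvBRec]
  by_cases h1 : PySem.Chars.endswith base "_dynamic".toList = true
  · rw [dif_pos h1, pvBRec_eq_peel, PySem.List.slice_to_neg_ofNat _ 8 (by omega),
        pvPeel_dyn ((PySem.Chars.endswith_iff _ _).mp h1)]
  · rw [dif_neg h1]
    by_cases h2 : PySem.Chars.endswith base "_f64".toList = true
    · rw [dif_pos h2, pvBRec_eq_peel, PySem.List.slice_to_neg_ofNat _ 4 (by omega),
          pvPeel_f64 ((PySem.Chars.endswith_iff _ _).mp h2)]
    · rw [dif_neg h2]
      by_cases h3 : PySem.Chars.endswith base "_f32".toList = true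
      · rw [dif_pos h3, pvBRec_eq_peel, PySem.List.slice_to_neg_ofNat _ 4 (by omega),
            pvPeel_f32 ((PySem.Chars.endswith_iff _ _).mp h3)]
      · rw [dif_neg h3]
        exact (pvPeel_none (fun hs => h1 ((PySem.Chars.endswith_iff _ _).mpr hs))
          (fun hs => h2 ((PySem.Chars.endswith_iff _ _).mpr hs))
          (fun hs => h3 ((PySem.Chars.endswith_iff _ _).mpr hs))).symm
termination_by base.length
decreasing_by
  · exact pvBStrip_lt base _ 8 (by omega) (by decide) h1
  · exact pvBStrip_lt base _ 4 (by omega) (by decide) h2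
  · exact pvBStrip_lt base _ 4 (by omega) (by decide) h3

-- ===== VERDICT (by name: the statement is the Claim_ definition above) =====
theorem canonical_model_name_py_spec : Claim_equal_canonical_model_name_py := by
  intro name _
  unfold Spec_canonical_model_name_py canonical_model_name_py canonical_model_name_py_alt
  rw [pvALoop_eq_peel, pvBRec_eq_peel]
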